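-- pv_equiv track=rewrite | github.com/mocliamg1/ai-toolkit | toolkit/models/wan21/wan_lora_convert.py | _convert_kohya_wan_key_to_original
-- ===== SOURCE A (Python) =====
-- def _split_kohya_suffix(key):
--     for suffix in (
--         ".alpha",
--         ".lora_down.weight",
--         ".lora_up.weight",
--         ".lora_A.weight",
--         ".lora_B.weight",
--     ):
--         if key.endswith(suffix):
--             return key[: -len(suffix)], suffix
--     return key, ""
--
-- def _convert_kohya_wan_key_to_original(key):
--     if not key.startswith("lora_unet_"):
--         return key
--
--     module_key, suffix = _split_kohya_suffix(key)
--     module_key = module_key[len("lora_unet_") :]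
--
--     stage_name = None
--     for candidate in ("transformer_1_", "transformer_2_"):
--         if module_key.startswith(candidate):
--             stage_name = candidate[:-1]
--             module_key = module_key[len(candidate) :]
--             break
--
--     if not module_key.startswith("blocks_"):
--         return key
--
--     parts = module_key.split("_")
--     if len(parts) < 4:
--         return key
--
--     _, block_idx, *remainder = parts
--     remainder_key = "_".join(remainder)
--
--     if remainder_key.startswith("ffn_"):
--         if remainder_key == "ffn_0":
--             target = f"blocks.{block_idx}.ffn.0"
--         elif remainder_key == "ffn_2":
--             target = f"blocks.{block_idx}.ffn.2"
--         else:
--             return key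
--     else:
--         attn_prefix_map = {
--             "self_attn_": "self_attn",
--             "cross_attn_": "cross_attn",
--             "attn1_": "self_attn",
--             "attn2_": "cross_attn",
--         }
--         attention_name = None
--         projection_key = None
--         for prefix, mapped_name in attn_prefix_map.items():
--             if remainder_key.startswith(prefix):
--                 attention_name = mapped_name
--                 projection_key = remainder_key[len(prefix) :]
--                 break
--
--         if attention_name is None or projection_key is None:
--             return key
--
--         projection_map = {
--             "q": "q",
--             "k": "k",
--             "v": "v",
--             "o": "o",
--             "to_q": "q",
--             "to_k": "k",
--             "to_v": "v",
--             "to_out": "o",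
--             "to_out_0": "o",
--             "k_img": "k_img",
--             "v_img": "v_img",
--             "add_k_proj": "k_img",
--             "add_v_proj": "v_img",
--         }
--         projection_name = projection_map.get(projection_key)
--         if projection_name is None:
--             return key
--
--         target = f"blocks.{block_idx}.{attention_name}.{projection_name}"
--
--     prefix = "diffusion_model."
--     if stage_name is not None:
--         prefix += f"{stage_name}."
--     return f"{prefix}{target}{suffix}"
-- ===== SOURCE B (Python) =====
-- # Table-driven re-implementation: one precomputed suffix->tail dictionary replaces the
-- # ffn/attention-prefix/projection branch chain, and split("_", 2) replaces split-all+join.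
--
-- _SUFFIXES = (
--     ".alpha",
--     ".lora_down.weight",
--     ".lora_up.weight",
--     ".lora_A.weight",
--     ".lora_B.weight",
-- )
--
-- _TAIL = {"ffn_0": "ffn.0", "ffn_2": "ffn.2"}
-- for _pre, _name in (
--     ("self_attn_", "self_attn"),
--     ("cross_attn_", "cross_attn"),
--     ("attn1_", "self_attn"),
--     ("attn2_", "cross_attn"),
-- ):
--     for _proj, _pname in (
--         ("q", "q"), ("k", "k"), ("v", "v"), ("o", "o"),
--         ("to_q", "q"), ("to_k", "k"), ("to_v", "v"),
--         ("to_out", "o"), ("to_out_0", "o"),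
--         ("k_img", "k_img"), ("v_img", "v_img"),
--         ("add_k_proj", "k_img"), ("add_v_proj", "v_img"),
--     ):
--         _TAIL[_pre + _proj] = _name + "." + _pname
--
--
-- def _convert_kohya_wan_key_to_original(key):
--     if not key.startswith("lora_unet_"):
--         return key
--     suffix = ""
--     for s in _SUFFIXES:
--         if key.endswith(s):
--             suffix = s
--             break
--     module_key = key[10:len(key) - len(suffix)]
--     stage = ""
--     if module_key.startswith("transformer_1_"):
--         stage = "transformer_1."
--     elif module_key.startswith("transformer_2_"):
--         stage = "transformer_2."
--     if stage:
--         module_key = module_key[14:]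
--     if not module_key.startswith("blocks_"):
--         return key
--     parts = module_key.split("_", 2)
--     if len(parts) < 3:
--         return key
--     _, block_idx, remainder_key = parts
--     tail = _TAIL.get(remainder_key)
--     if tail is None:
--         return key
--     return f"diffusion_model.{stage}blocks.{block_idx}.{tail}{suffix}"
-- ===== Notes on version B (the rewrite author's own statement) =====
-- stated objective: alternative
-- what changed: Replaces the ffn-check + attention-prefix loop + projection-dict back end with a single flat suffix-to-tail dictionary precomputed at module load, and replaces the split-everything-then-rejoin-the-remainder front end with one maxsplit-2 split; the stage marker is tracked as a plain string instead of an Optional name.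
import Mathlib
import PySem

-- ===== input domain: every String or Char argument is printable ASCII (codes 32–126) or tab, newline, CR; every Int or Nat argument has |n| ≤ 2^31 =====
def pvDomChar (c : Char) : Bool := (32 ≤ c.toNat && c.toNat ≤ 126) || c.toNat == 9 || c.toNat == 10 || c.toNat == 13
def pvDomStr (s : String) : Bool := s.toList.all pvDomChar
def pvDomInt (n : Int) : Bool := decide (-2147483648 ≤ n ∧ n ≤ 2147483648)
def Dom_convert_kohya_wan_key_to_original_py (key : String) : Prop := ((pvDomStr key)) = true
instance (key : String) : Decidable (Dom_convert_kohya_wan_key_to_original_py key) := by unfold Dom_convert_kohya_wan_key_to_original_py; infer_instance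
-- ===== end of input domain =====

-- B replaces A's branch-chain back end by one precomputed suffix->tail table and A's
-- split-all+rejoin by split('_', 2); objective: alternative decomposition (same cost).

-- ===== PORT A =====
def pvSuffixesA : List String :=
  [".alpha", ".lora_down.weight", ".lora_up.weight", ".lora_A.weight", ".lora_B.weight"]

-- for suffix in (...): if key.endswith(suffix): return key[:-len(suffix)], suffix
def pvSplitKohyaSuffixA (key : String) : List String → String × String
  | [] => (key, "")
  | s :: rest =>
    if PySem.Str.endswith key s then
      (PySem.Str.slice key none (some (-(PySem.Str.len s))), s)
    else pvSplitKohyaSuffixA key rest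

-- for candidate in ("transformer_1_", "transformer_2_"): ... break
def pvStageLoopA (module_key : String) : List String → Option String × String
  | [] => (none, module_key)
  | c :: rest =>
    if PySem.Str.startswith module_key c then
      (some (PySem.Str.slice c none (some (-1))),
       PySem.Str.slice module_key (some (PySem.Str.len c)) none)
    else pvStageLoopA module_key rest

def pvAttnPrefixMapA : List (String × String) :=
  [("self_attn_", "self_attn"), ("cross_attn_", "cross_attn"),
   ("attn1_", "self_attn"), ("attn2_", "cross_attn")]

-- for prefix, mapped_name in attn_prefix_map.items(): ... break
def pvAttnLoopA (rk : String) : List (String × String) → Option (String × String)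
  | [] => none
  | (p, m) :: rest =>
    if PySem.Str.startswith rk p then
      some (m, PySem.Str.slice rk (some (PySem.Str.len p)) none)
    else pvAttnLoopA rk rest

def pvProjectionMapA : PySem.Dict String String :=
  ⟨[("q", "q"), ("k", "k"), ("v", "v"), ("o", "o"),
    ("to_q", "q"), ("to_k", "k"), ("to_v", "v"),
    ("to_out", "o"), ("to_out_0", "o"),
    ("k_img", "k_img"), ("v_img", "v_img"),
    ("add_k_proj", "k_img"), ("add_v_proj", "v_img")]⟩

-- the ffn / attention-prefix / projection chain computing target (early `return key` = none)
def pvTargetA (block_idx remainder_key : String) : Option String :=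
  if PySem.Str.startswith remainder_key "ffn_" then
    if remainder_key == "ffn_0" then some ("blocks." ++ block_idx ++ ".ffn.0")
    else if remainder_key == "ffn_2" then some ("blocks." ++ block_idx ++ ".ffn.2")
    else none
  else
    match pvAttnLoopA remainder_key pvAttnPrefixMapA with
    | none => none
    | some (attention_name, projection_key) =>
      match pvProjectionMapA.get? projection_key with
      | none => none
      | some projection_name =>
        some ("blocks." ++ block_idx ++ "." ++ attention_name ++ "." ++ projection_name)

-- the function body from the `blocks_` check on
def pvABlocksA (key module_key : String) (stage_name : Option String) (suffix : String) : String :=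
  if !(PySem.Str.startswith module_key "blocks_") then key
  else
    -- module_key.split("_"): the separator is the nonempty literal "_", so this is exactly Chars.splitOn
    let parts : List String := (PySem.Chars.splitOn module_key.toList ['_']).map String.ofList
    if parts.length < 4 then key
    else
      match parts with
      | _ :: block_idx :: remainder =>
        match pvTargetA block_idx (PySem.Str.join "_" remainder) with
        | none => key
        | some target =>
          let prefix1 : String :=
            match stage_name with
            | some stage_name => "diffusion_model." ++ stage_name ++ "."
            | none => "diffusion_model."
          prefix1 ++ target ++ suffix
      | _ => key  -- unreachable: parts.length ≥ 4 here

def convert_kohya_wan_key_to_original_py (key : String) : String :=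
  if !(PySem.Str.startswith key "lora_unet_") then key
  else
    let ms := pvSplitKohyaSuffixA key pvSuffixesA
    let module_key := PySem.Str.slice ms.1 (some (PySem.Str.len "lora_unet_")) none
    let st := pvStageLoopA module_key ["transformer_1_", "transformer_2_"]
    pvABlocksA key st.2 st.1 ms.2

-- ===== PORT B =====
def pvSuffixesB : List String :=
  [".alpha", ".lora_down.weight", ".lora_up.weight", ".lora_A.weight", ".lora_B.weight"]

def pvFindSuffixB (key : String) : List String → String
  | [] => ""
  | s :: rest => if PySem.Str.endswith key s then s else pvFindSuffixB key rest

def pvTailPrefixesB : List (String × String) :=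
  [("self_attn_", "self_attn"), ("cross_attn_", "cross_attn"),
   ("attn1_", "self_attn"), ("attn2_", "cross_attn")]

def pvTailProjB : List (String × String) :=
  [("q", "q"), ("k", "k"), ("v", "v"), ("o", "o"),
   ("to_q", "q"), ("to_k", "k"), ("to_v", "v"),
   ("to_out", "o"), ("to_out_0", "o"),
   ("k_img", "k_img"), ("v_img", "v_img"),
   ("add_k_proj", "k_img"), ("add_v_proj", "v_img")]

-- the module-load-time table build: _TAIL = {"ffn_0": …}; for … : _TAIL[pre+proj] = name+"."+pname
def pvTailTableB : PySem.Dict String String :=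
  pvTailPrefixesB.foldl
    (fun d pn => pvTailProjB.foldl (fun d pp => d.insert (pn.1 ++ pp.1) (pn.2 ++ "." ++ pp.2)) d)
    ⟨[("ffn_0", "ffn.0"), ("ffn_2", "ffn.2")]⟩

-- the body from the `blocks_` check on: one split('_', 2) and one table lookup
def pvBBlocksB (key module_key stage suffix : String) : String :=
  if !(PySem.Str.startswith module_key "blocks_") then key
  else
    -- module_key.split("_", 2): nonempty literal separator, so exactly Chars.splitOnMax
    let parts : List String := (PySem.Chars.splitOnMax module_key.toList ['_'] 2).map String.ofList
    if parts.length < 3 then key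
    else
      match parts with
      | _ :: block_idx :: remainder_key :: _ =>
        match pvTailTableB.get? remainder_key with
        | none => key
        | some tail =>
          "diffusion_model." ++ stage ++ "blocks." ++ block_idx ++ "." ++ tail ++ suffix
      | _ => key  -- unreachable: parts.length ≥ 3 here

def convert_kohya_wan_key_to_original_py_alt (key : String) : String :=
  if !(PySem.Str.startswith key "lora_unet_") then key
  else
    let suffix := pvFindSuffixB key pvSuffixesB
    let module_key :=
      PySem.Str.slice key (some 10) (some (PySem.Str.len key - PySem.Str.len suffix))
    let stage : String :=
      if PySem.Str.startswith module_key "transformer_1_" then "transformer_1."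
      else if PySem.Str.startswith module_key "transformer_2_" then "transformer_2."
      else ""
    let module_key := if stage == "" then module_key else PySem.Str.slice module_key (some 14) none
    pvBBlocksB key module_key stage suffix

-- ===== PRECONDITION & SPEC =====
def Spec_convert_kohya_wan_key_to_original_py (key : String) (out : String) : Prop := out = convert_kohya_wan_key_to_original_py_alt key
instance (key : String) (out : String) : Decidable (Spec_convert_kohya_wan_key_to_original_py key out) := by unfold Spec_convert_kohya_wan_key_to_original_py; infer_instance

-- ===== CLAIM (what is proved, stated in full; the proofs are below) =====
def Claim_equal_convert_kohya_wan_key_to_original_py : Prop := ∀ (key : String), Dom_convert_kohya_wan_key_to_original_py key → Spec_convert_kohya_wan_key_to_original_py key (convert_kohya_wan_key_to_original_py key)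


-- ===== LEMMAS AND PROOFS =====

-- ---- characterization of Chars.splitOn / Chars.splitOnMax with single separator '_' ----

def pvSp1 (cur : List Char) : List Char → List (List Char)
  | [] => [cur]
  | c :: rest => if c = '_' then cur :: pvSp1 [] rest else pvSp1 (cur ++ [c]) rest

theorem sp1_go : ∀ (fuel : Nat) (l cur : List Char) (acc : List (List Char)), l.length ≤ fuel →
    PySem.Chars.splitOn.go ['_'] fuel l cur acc = acc.reverse ++ pvSp1 cur.reverse l := by
  intro fuel
  induction fuel with
  | zero =>
    intro l cur acc h
    have hl : l = [] := List.eq_nil_of_length_eq_zero (Nat.le_zero.mp h)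
    subst hl
    simp [PySem.Chars.splitOn.go, pvSp1]
  | succ n ih =>
    intro l cur acc h
    cases l with
    | nil => simp [PySem.Chars.splitOn.go, pvSp1]
    | cons c rest =>
      rw [PySem.Chars.splitOn.go]
      by_cases hc : c = '_'
      · subst hc
        have : List.isPrefixOf ['_'] ('_' :: rest) = true := by simp [List.isPrefixOf]
        rw [if_pos this]
        rw [ih _ _ _ (by simpa using Nat.le_of_succ_le_succ (by simpa using h))]
        simp [pvSp1]
      · have : List.isPrefixOf ['_'] (c :: rest) = false := by
          simp [List.isPrefixOf]; exact fun h' => (hc h'.symm).elim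
        rw [if_neg (by simp [this])]
        rw [ih _ _ _ (by simpa using Nat.le_of_succ_le_succ (by simpa using h))]
        simp [pvSp1, hc]

theorem splitOn_eq (l : List Char) : PySem.Chars.splitOn l ['_'] = pvSp1 [] l := by
  rw [PySem.Chars.splitOn, sp1_go _ _ _ _ (by omega)]; rfl

def pvSpm (m : Nat) (cur : List Char) : List Char → List (List Char)
  | [] => [cur]
  | c :: rest =>
    if m = 0 then [cur ++ (c :: rest)]
    else if c = '_' then cur :: pvSpm (m-1) [] rest else pvSpm m (cur ++ [c]) rest

theorem spm_go : ∀ (fuel : Nat) (m : Nat) (l cur : List Char) (acc : List (List Char)), l.length ≤ fuel →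
    PySem.Chars.splitOnMax.go ['_'] fuel m l cur acc = acc.reverse ++ pvSpm m cur.reverse l := by
  intro fuel
  induction fuel with
  | zero =>
    intro m l cur acc h
    have hl : l = [] := List.eq_nil_of_length_eq_zero (Nat.le_zero.mp h)
    subst hl
    simp [PySem.Chars.splitOnMax.go, pvSpm]
  | succ n ih =>
    intro m l cur acc h
    cases l with
    | nil => simp [PySem.Chars.splitOnMax.go, pvSpm]
    | cons c rest =>
      rw [PySem.Chars.splitOnMax.go]
      by_cases hm : m = 0
      · subst hm
        simp [pvSpm]
      · rw [if_neg hm]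
        by_cases hc : c = '_'
        · subst hc
          have : List.isPrefixOf ['_'] ('_' :: rest) = true := by simp [List.isPrefixOf]
          rw [if_pos this]
          rw [ih _ _ _ _ (by simpa using Nat.le_of_succ_le_succ (by simpa using h))]
          simp [pvSpm, hm]
        · have : List.isPrefixOf ['_'] (c :: rest) = false := by
            simp [List.isPrefixOf]; exact fun h' => (hc h'.symm).elim
          rw [if_neg (by simp [this])]
          rw [ih _ _ _ _ (by simpa using Nat.le_of_succ_le_succ (by simpa using h))]
          simp [pvSpm, hm, hc]

theorem splitOnMax_eq (l : List Char) : PySem.Chars.splitOnMax l ['_'] 2 = pvSpm 2 [] l := by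
  rw [PySem.Chars.splitOnMax, if_neg (by norm_num), spm_go _ _ _ _ _ (by omega)]; rfl

theorem sp1_ne_nil (cur l : List Char) : pvSp1 cur l ≠ [] := by
  induction l generalizing cur with
  | nil => simp [pvSp1]
  | cons c rest ih => simp only [pvSp1]; split_ifs <;> simp [ih]

theorem sp1_rejoin (l : List Char) : ∀ cur, List.intercalate ['_'] (pvSp1 cur l) = cur ++ l := by
  induction l with
  | nil => intro cur; simp [pvSp1, List.intercalate]
  | cons c rest ih =>
    intro cur
    simp only [pvSp1]
    split_ifs with hc
    · subst hc
      rcases hne : pvSp1 [] rest with _ | ⟨p, ps⟩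
      · exact absurd hne (sp1_ne_nil _ _)
      · have := ih []
        rw [hne] at this
        simp only [List.intercalate, List.intersperse, List.flatten] at this ⊢
        simp [this]
    · rw [ih]; simp

def pvTrunc (m : Nat) (parts : List (List Char)) : List (List Char) :=
  if parts.length ≤ m+1 then parts else parts.take m ++ [List.intercalate ['_'] (parts.drop m)]

theorem trunc_zero (cur l : List Char) : pvTrunc 0 (pvSp1 cur l) = [List.intercalate ['_'] (pvSp1 cur l)] := by
  rw [pvTrunc]
  split_ifs with h
  · rcases hne : pvSp1 cur l with _ | ⟨p, ps⟩
    · exact absurd hne (sp1_ne_nil _ _)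
    · rw [hne] at h
      simp at h
      subst h
      simp [List.intercalate]
  · simp

theorem trunc_cons (m : Nat) (hm : m ≠ 0) (cur : List Char) (P : List (List Char)) :
    pvTrunc m (cur :: P) = cur :: pvTrunc (m-1) P := by
  rw [pvTrunc, pvTrunc]
  rcases m with _ | m
  · exact absurd rfl hm
  · simp only [List.length_cons, Nat.succ_sub_one, List.take_succ_cons, List.drop_succ_cons]
    split_ifs with h1 h2 h2 <;> try omega
    · rfl
    · simp

theorem spm_eq_trunc (l : List Char) : ∀ (m : Nat) (cur : List Char), pvSpm m cur l = pvTrunc m (pvSp1 cur l) := by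
  induction l with
  | nil => intro m cur; simp [pvSpm, pvSp1, pvTrunc]
  | cons c rest ih =>
    intro m cur
    by_cases hm : m = 0
    · subst hm
      rw [trunc_zero, sp1_rejoin]
      simp [pvSpm]
    · simp only [pvSpm, pvSp1, if_neg hm]
      split_ifs with hc
      · rw [ih, trunc_cons m hm]
      · rw [ih]

theorem sp1_no_sep (l : List Char) : ∀ cur, '_' ∉ cur → ∀ p ∈ pvSp1 cur l, '_' ∉ p := by
  induction l with
  | nil => intro cur hc p hp; simp [pvSp1] at hp; subst hp; exact hc
  | cons c rest ih =>
    intro cur hc p hp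
    simp only [pvSp1] at hp
    split_ifs at hp with h
    · rcases List.mem_cons.mp hp with rfl | hp'
      · exact hc
      · exact ih [] (by simp) p hp'
    · exact ih (cur ++ [c]) (by simp [hc]; exact fun h' => h h'.symm) p hp

-- ---- the flat table agrees with A's branch chain ----

def pvAtail (rk : String) : Option String :=
  if PySem.Str.startswith rk "ffn_" then
    if rk == "ffn_0" then some "ffn.0" else if rk == "ffn_2" then some "ffn.2" else none
  else
    (pvAttnLoopA rk pvAttnPrefixMapA).bind
      (fun mp => (pvProjectionMapA.get? mp.2).map (fun pn => mp.1 ++ "." ++ pn))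

def pvKeysLit : List String :=
  ["ffn_0", "ffn_2", "self_attn_q", "self_attn_k", "self_attn_v", "self_attn_o", "self_attn_to_q", "self_attn_to_k",
   "self_attn_to_v", "self_attn_to_out", "self_attn_to_out_0", "self_attn_k_img", "self_attn_v_img",
   "self_attn_add_k_proj", "self_attn_add_v_proj", "cross_attn_q", "cross_attn_k", "cross_attn_v", "cross_attn_o",
   "cross_attn_to_q", "cross_attn_to_k", "cross_attn_to_v", "cross_attn_to_out", "cross_attn_to_out_0",
   "cross_attn_k_img", "cross_attn_v_img", "cross_attn_add_k_proj", "cross_attn_add_v_proj", "attn1_q", "attn1_k",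
   "attn1_v", "attn1_o", "attn1_to_q", "attn1_to_k", "attn1_to_v", "attn1_to_out", "attn1_to_out_0", "attn1_k_img",
   "attn1_v_img", "attn1_add_k_proj", "attn1_add_v_proj", "attn2_q", "attn2_k", "attn2_v", "attn2_o", "attn2_to_q",
   "attn2_to_k", "attn2_to_v", "attn2_to_out", "attn2_to_out_0", "attn2_k_img", "attn2_v_img", "attn2_add_k_proj",
   "attn2_add_v_proj"]

set_option maxRecDepth 100000 in
theorem tbl_mem_case (rk : String) (hmem : rk ∈ pvKeysLit) : pvTailTableB.get? rk = pvAtail rk := by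
  fin_cases hmem <;> decide

theorem get?_some_mem_fst {κ ν : Type} [BEq κ] [LawfulBEq κ] (d : PySem.Dict κ ν) (k : κ) (v : ν)
    (h : d.get? k = some v) : k ∈ d.items.map Prod.fst := by
  rw [PySem.Dict.get?] at h
  rcases Option.map_eq_some_iff.mp h with ⟨pair, hfind, _⟩
  have h1 : pair.1 = k := by
    have := List.find?_some hfind
    simpa using this
  exact h1 ▸ List.mem_map_of_mem (List.mem_of_find?_eq_some hfind)

def pvProjKeysLit : List String :=
  ["q", "k", "v", "o", "to_q", "to_k", "to_v", "to_out", "to_out_0", "k_img", "v_img", "add_k_proj", "add_v_proj"]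

set_option maxRecDepth 10000 in
theorem concat_mem (p q : String) (hp : p ∈ ["self_attn_", "cross_attn_", "attn1_", "attn2_"])
    (hq : q ∈ pvProjKeysLit) : String.ofList (p.toList ++ q.toList) ∈ pvKeysLit := by
  fin_cases hp <;> fin_cases hq <;> decide

theorem startswith_concat (rk p : String) (hs : PySem.Str.startswith rk p = true) :
    rk = String.ofList (p.toList ++ (PySem.Str.slice rk (some (PySem.Str.len p)) none).toList) := by
  have hpre : p.toList <+: rk.toList := by
    rw [PySem.Str.startswith_eq] at hs
    exact (PySem.Chars.startswith_iff _ _).mp hs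
  rcases hpre with ⟨t, ht⟩
  rw [PySem.Str.toList_slice, PySem.Str.len_eq, PySem.Chars.slice_eq_listSlice,
      PySem.List.slice_from _ (by positivity)]
  apply String.toList_inj.mp
  rw [String.toList_ofList, ← ht]
  simp

set_option maxRecDepth 100000 in
theorem tbl_get?_none (rk : String) (hmem : rk ∉ pvKeysLit) : pvTailTableB.get? rk = none := by
  have hkeys : pvTailTableB.items.map Prod.fst = pvKeysLit := by decide
  rw [PySem.Dict.get?, List.find?_eq_none.mpr]
  · rfl
  · intro pair hp
    simp only [beq_iff_eq]
    intro he
    have hm : pair.1 ∈ pvTailTableB.items.map Prod.fst := List.mem_map_of_mem hp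
    rw [hkeys] at hm
    exact hmem (he ▸ hm)

theorem tbl_nonmem_case (rk : String) (hmem : rk ∉ pvKeysLit) : pvTailTableB.get? rk = pvAtail rk := by
  have key : ∀ (p : String), p ∈ ["self_attn_", "cross_attn_", "attn1_", "attn2_"] →
      PySem.Str.startswith rk p = true →
      pvProjectionMapA.get? (PySem.Str.slice rk (some (PySem.Str.len p)) none) = none := by
    intro p hp hs
    rcases hget : pvProjectionMapA.get? (PySem.Str.slice rk (some (PySem.Str.len p)) none) with _ | pn
    · rfl
    · exfalso
      have hq : (PySem.Str.slice rk (some (PySem.Str.len p)) none) ∈ pvProjectionMapA.items.map Prod.fst :=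
        get?_some_mem_fst _ _ _ hget
      have hq' : (PySem.Str.slice rk (some (PySem.Str.len p)) none) ∈ pvProjKeysLit := hq
      exact hmem ((startswith_concat rk p hs) ▸ concat_mem p _ hp hq')
  rw [tbl_get?_none rk hmem, pvAtail]
  simp only [pvAttnLoopA, pvAttnPrefixMapA]
  split_ifs with hffn he0 he2 h1 h2 h3 h4
  · exact absurd (by rw [beq_iff_eq.mp he0]; decide) hmem
  · exact absurd (by rw [beq_iff_eq.mp he2]; decide) hmem
  · rfl
  · simp only [Option.bind_some]; rw [key _ (by decide) h1]; rfl
  · simp only [Option.bind_some]; rw [key _ (by decide) h2]; rfl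
  · simp only [Option.bind_some]; rw [key _ (by decide) h3]; rfl
  · simp only [Option.bind_some]; rw [key _ (by decide) h4]; rfl
  · rfl

theorem tbl_eq (rk : String) : pvTailTableB.get? rk = pvAtail rk := by
  by_cases hmem : rk ∈ pvKeysLit
  · exact tbl_mem_case rk hmem
  · exact tbl_nonmem_case rk hmem

theorem keys_have_underscore : ∀ k ∈ pvKeysLit, '_' ∈ k.toList := by decide

-- ---- suffix handling ----

theorem slice_neg_to (xs : List Char) (n : Nat) (h1 : 1 ≤ n) (h2 : n ≤ xs.length) :
    PySem.List.slice xs none (some (-(n:Int))) = xs.take (xs.length - n) := by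
  have hb : PySem.List.clampIdx xs.length (-(n:Int)) = xs.length - n := by
    rw [PySem.List.clampIdx]; split_ifs <;> omega
  simp [PySem.List.slice, hb]

theorem sfx_spec : ∀ (L : List String), (∀ s ∈ L, s.toList ≠ []) → ∀ key : String,
    (pvSplitKohyaSuffixA key L).2 = pvFindSuffixB key L ∧
    (pvFindSuffixB key L).toList.length ≤ key.toList.length ∧
    (pvSplitKohyaSuffixA key L).1.toList =
      key.toList.take (key.toList.length - (pvFindSuffixB key L).toList.length) := by
  intro L
  induction L with
  | nil => intro _ key; refine ⟨rfl, by simp [pvFindSuffixB], ?_⟩; simp [pvSplitKohyaSuffixA, pvFindSuffixB]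
  | cons s rest ih =>
    intro hne key
    by_cases hend : PySem.Str.endswith key s = true
    · have hsuf : s.toList <:+ key.toList := by
        rw [PySem.Str.endswith_eq] at hend
        exact (PySem.Chars.endswith_iff _ _).mp hend
      have hlen : s.toList.length ≤ key.toList.length := hsuf.length_le
      have hpos : 1 ≤ s.toList.length := by
        have := hne s (List.mem_cons_self ..)
        cases hsl : s.toList with
        | nil => exact absurd hsl this
        | cons a b => simp
      have hA : pvSplitKohyaSuffixA key (s :: rest) = (PySem.Str.slice key none (some (-(PySem.Str.len s))), s) := by
        simp only [pvSplitKohyaSuffixA]; rw [if_pos hend]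
      have hB : pvFindSuffixB key (s :: rest) = s := by
        simp only [pvFindSuffixB]; rw [if_pos hend]
      refine ⟨by rw [hA, hB], by rw [hB]; exact hlen, ?_⟩
      rw [hA, hB]
      rw [PySem.Str.toList_slice, PySem.Str.len_eq, PySem.Chars.slice_eq_listSlice]
      exact slice_neg_to _ _ hpos hlen
    · have h1 : pvSplitKohyaSuffixA key (s :: rest) = pvSplitKohyaSuffixA key rest := by
        simp only [pvSplitKohyaSuffixA]; rw [if_neg hend]
      have h2 : pvFindSuffixB key (s :: rest) = pvFindSuffixB key rest := by
        simp only [pvFindSuffixB]; rw [if_neg hend]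
      rw [h1, h2]
      exact ih (fun t ht => hne t (List.mem_cons_of_mem _ ht)) key

-- ---- A's target? equals pvAtail, mapped ----

theorem targetA_eq (idx rk : String) :
    pvTargetA idx rk = (pvAtail rk).map (fun t => "blocks." ++ idx ++ "." ++ t) := by
  rw [pvTargetA, pvAtail]
  split_ifs with hffn he0 he2
  · simp only [Option.map_some, String.append_assoc]
    have h : ("." : String) ++ "ffn.0" = ".ffn.0" := rfl
    rw [h]
  · simp only [Option.map_some, String.append_assoc]
    have h : ("." : String) ++ "ffn.2" = ".ffn.2" := rfl
    rw [h]
  · rfl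
  · cases hl : pvAttnLoopA rk pvAttnPrefixMapA with
    | none => rfl
    | some mp =>
      obtain ⟨an, pk⟩ := mp
      cases hg : pvProjectionMapA.get? pk with
      | none => simp [hg]
      | some pn =>
        simp only [hg, Option.bind_some, Option.map_some, String.append_assoc]

-- ---- pieces around "blocks_" ----

theorem sp1_blocks (rest : List Char) :
    pvSp1 [] ("blocks_".toList ++ rest) = "blocks".toList :: pvSp1 [] rest := by
  have h1 : "blocks_".toList = ['b','l','o','c','k','s','_'] := by decide
  have h2 : "blocks".toList = ['b','l','o','c','k','s'] := by decide
  rw [h1, h2]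
  simp [pvSp1]

theorem spm_blocks (rest : List Char) :
    pvSpm 2 [] ("blocks_".toList ++ rest) = "blocks".toList :: pvSpm 1 [] rest := by
  have h1 : "blocks_".toList = ['b','l','o','c','k','s','_'] := by decide
  have h2 : "blocks".toList = ['b','l','o','c','k','s'] := by decide
  rw [h1, h2]
  simp [pvSpm]

-- ---- the cores agree ----

theorem core_eq (key mk sfx : String) (stA : Option String) (stB : String)
    (hst : stB = (match stA with | none => "" | some s => s ++ ".")) :
    pvABlocksA key mk stA sfx = pvBBlocksB key mk stB sfx := by
  unfold pvABlocksA pvBBlocksB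
  by_cases hbl : PySem.Str.startswith mk "blocks_" = true
  · rw [if_neg (show ¬((!PySem.Str.startswith mk "blocks_") = true) by rw [hbl]; decide)]
    rw [if_neg (show ¬((!PySem.Str.startswith mk "blocks_") = true) by rw [hbl]; decide)]
    have hpre : "blocks_".toList <+: mk.toList := by
      rw [PySem.Str.startswith_eq] at hbl
      exact (PySem.Chars.startswith_iff _ _).mp hbl
    obtain ⟨t, ht⟩ := hpre
    rw [splitOn_eq, splitOnMax_eq, ← ht, sp1_blocks, spm_blocks, spm_eq_trunc]
    rcases hsp : pvSp1 [] t with _ | ⟨idx, rem⟩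
    · exact absurd hsp (sp1_ne_nil _ _)
    · rcases rem with _ | ⟨r1, rem1⟩
      · -- one piece after blocks_: both guards fire, both return key
        have htr : pvTrunc 1 [idx] = [idx] := by simp [pvTrunc]
        rw [htr]
        rw [if_pos (show (List.map String.ofList ["blocks".toList, idx]).length < 4 by simp)]
        rw [if_pos (show (List.map String.ofList ["blocks".toList, idx]).length < 3 by simp)]
      · rcases rem1 with _ | ⟨r2, rem2⟩
        · -- exactly two pieces: A's guard fires; B looks up an underscore-free key
          have htr : pvTrunc 1 [idx, r1] = [idx, r1] := by simp [pvTrunc]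
          rw [htr]
          rw [if_pos (show (List.map String.ofList ["blocks".toList, idx, r1]).length < 4 by simp)]
          rw [if_neg (show ¬((List.map String.ofList ["blocks".toList, idx, r1]).length < 3) by simp)]
          have hnu : '_' ∉ r1 :=
            sp1_no_sep t [] (by simp) r1 (by rw [hsp]; simp)
          have hnk : String.ofList r1 ∉ pvKeysLit := by
            intro hmem
            have := keys_have_underscore _ hmem
            rw [String.toList_ofList] at this
            exact hnu this
          simp only [List.map_cons, List.map_nil]
          rw [tbl_get?_none _ hnk]
        · -- three or more pieces: the interesting case
          have htr : pvTrunc 1 (idx :: r1 :: r2 :: rem2) =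
              [idx, List.intercalate ['_'] (r1 :: r2 :: rem2)] := by
            rw [pvTrunc]
            simp
          rw [htr]
          rw [if_neg (show ¬((List.map String.ofList
                ("blocks".toList :: idx :: r1 :: r2 :: rem2)).length < 4) by simp)]
          rw [if_neg (show ¬((List.map String.ofList
                ["blocks".toList, idx, List.intercalate ['_'] (r1 :: r2 :: rem2)]).length < 3) by simp)]
          simp only [List.map_cons, List.map_nil]
          have hrk : PySem.Str.join "_" (String.ofList r1 :: String.ofList r2 :: List.map String.ofList rem2) =
              String.ofList (List.intercalate ['_'] (r1 :: r2 :: rem2)) := by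
            apply String.toList_inj.mp
            rw [PySem.Str.toList_join, String.toList_ofList]
            simp only [List.map_cons, String.toList_ofList, List.map_map]
            have h2 : (String.toList ∘ String.ofList) = (id : List Char → List Char) := by
              funext l; simp
            rw [h2, List.map_id]
            rfl
          rw [hrk]
          rw [targetA_eq, ← tbl_eq]
          cases hg : pvTailTableB.get? (String.ofList (List.intercalate ['_'] (r1 :: r2 :: rem2))) with
          | none => rfl
          | some tail =>
            simp only [Option.map_some]
            cases stA with
            | none =>
              simp only at hst
              subst hst
              simp only [String.append_assoc]
              have h : ("" : String) ++ ("blocks." ++ (String.ofList idx ++ ("." ++ (tail ++ sfx))))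
                  = "blocks." ++ (String.ofList idx ++ ("." ++ (tail ++ sfx))) := by
                simp
              rw [h]
            | some st =>
              simp only at hst
              subst hst
              simp only [String.append_assoc]
  · have hbf : PySem.Str.startswith mk "blocks_" = false := by
      cases h : PySem.Str.startswith mk "blocks_" <;> simp_all
    rw [if_pos (show ((!PySem.Str.startswith mk "blocks_") = true) by rw [hbf]; decide)]
    rw [if_pos (show ((!PySem.Str.startswith mk "blocks_") = true) by rw [hbf]; decide)]

-- ---- main equivalence ----

set_option maxHeartbeats 1000000 in
theorem main_eq (key : String) :
    convert_kohya_wan_key_to_original_py key = convert_kohya_wan_key_to_original_py_alt key := by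
  cases hpre : PySem.Str.startswith key "lora_unet_" with
  | false =>
    rw [convert_kohya_wan_key_to_original_py, convert_kohya_wan_key_to_original_py_alt]
    rw [if_pos (by rw [hpre]; decide), if_pos (by rw [hpre]; decide)]
  | true =>
    rw [convert_kohya_wan_key_to_original_py, convert_kohya_wan_key_to_original_py_alt]
    rw [if_neg (by rw [hpre]; decide), if_neg (by rw [hpre]; decide)]
    show pvABlocksA key
        (pvStageLoopA
          (PySem.Str.slice (pvSplitKohyaSuffixA key pvSuffixesA).1 (some (PySem.Str.len "lora_unet_")) none)
          ["transformer_1_", "transformer_2_"]).2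
        (pvStageLoopA
          (PySem.Str.slice (pvSplitKohyaSuffixA key pvSuffixesA).1 (some (PySem.Str.len "lora_unet_")) none)
          ["transformer_1_", "transformer_2_"]).1
        (pvSplitKohyaSuffixA key pvSuffixesA).2
      = pvBBlocksB key
        (if ((if PySem.Str.startswith
                 (PySem.Str.slice key (some 10)
                   (some (PySem.Str.len key - PySem.Str.len (pvFindSuffixB key pvSuffixesB))))
                 "transformer_1_" then "transformer_1."
              else if PySem.Str.startswith
                 (PySem.Str.slice key (some 10)
                   (some (PySem.Str.len key - PySem.Str.len (pvFindSuffixB key pvSuffixesB))))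
                 "transformer_2_" then "transformer_2."
              else "") == "") = true
         then PySem.Str.slice key (some 10)
                (some (PySem.Str.len key - PySem.Str.len (pvFindSuffixB key pvSuffixesB)))
         else PySem.Str.slice
                (PySem.Str.slice key (some 10)
                  (some (PySem.Str.len key - PySem.Str.len (pvFindSuffixB key pvSuffixesB))))
                (some 14) none)
        (if PySem.Str.startswith
             (PySem.Str.slice key (some 10)
               (some (PySem.Str.len key - PySem.Str.len (pvFindSuffixB key pvSuffixesB))))
             "transformer_1_" then "transformer_1."
         else if PySem.Str.startswith
             (PySem.Str.slice key (some 10)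
               (some (PySem.Str.len key - PySem.Str.len (pvFindSuffixB key pvSuffixesB))))
             "transformer_2_" then "transformer_2."
         else "")
        (pvFindSuffixB key pvSuffixesB)
    obtain ⟨h2eq, hsublen, h1eq⟩ := sfx_spec pvSuffixesA (by decide) key
    have hBA : pvFindSuffixB key pvSuffixesB = pvFindSuffixB key pvSuffixesA := rfl
    -- the two module_key strings (before stage stripping) coincide
    have hmk : PySem.Str.slice (pvSplitKohyaSuffixA key pvSuffixesA).1 (some (PySem.Str.len "lora_unet_")) none
             = PySem.Str.slice key (some 10)
                 (some (PySem.Str.len key - PySem.Str.len (pvFindSuffixB key pvSuffixesA))) := by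
      apply String.toList_inj.mp
      rw [PySem.Str.toList_slice, PySem.Str.toList_slice, PySem.Chars.slice_eq_listSlice,
          PySem.Chars.slice_eq_listSlice]
      have h10 : PySem.Str.len "lora_unet_" = ((10:Nat):Int) := by decide
      rw [h10, PySem.List.slice_from _ (by positivity), h1eq]
      rw [PySem.Str.len_eq, PySem.Str.len_eq]
      rw [show ((10:Nat):Int) = (10:Int) from rfl,
          show (10:Int) = ((10:Nat):Int) from rfl,
          ← Nat.cast_sub hsublen, PySem.List.slice_natCast, List.drop_take]
      simp
    rw [hBA, ← hmk, h2eq]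
    set mk0 := PySem.Str.slice (pvSplitKohyaSuffixA key pvSuffixesA).1 (some (PySem.Str.len "lora_unet_")) none with hmk0
    -- stage case analysis
    cases ht1 : PySem.Str.startswith mk0 "transformer_1_" with
    | true =>
      have hA : pvStageLoopA mk0 ["transformer_1_", "transformer_2_"] =
          (some (PySem.Str.slice "transformer_1_" none (some (-1))),
           PySem.Str.slice mk0 (some (PySem.Str.len "transformer_1_")) none) := by
        simp only [pvStageLoopA]; rw [if_pos ht1]
      rw [hA, if_pos (show ((true : Bool) = true) from rfl),
          if_neg (show ¬((("transformer_1." : String) == "") = true) by decide),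
          show PySem.Str.len "transformer_1_" = (14:Int) by decide]
      exact core_eq key _ _ _ _ (by rfl)
    | false =>
      cases ht2 : PySem.Str.startswith mk0 "transformer_2_" with
      | true =>
        have hA : pvStageLoopA mk0 ["transformer_1_", "transformer_2_"] =
            (some (PySem.Str.slice "transformer_2_" none (some (-1))),
             PySem.Str.slice mk0 (some (PySem.Str.len "transformer_2_")) none) := by
          simp only [pvStageLoopA]; rw [if_neg (by rw [ht1]; decide), if_pos ht2]
        rw [hA, if_neg (show ¬((false : Bool) = true) by decide),
            if_pos (show ((true : Bool) = true) from rfl),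
            if_neg (show ¬((("transformer_2." : String) == "") = true) by decide),
            show PySem.Str.len "transformer_2_" = (14:Int) by decide]
        exact core_eq key _ _ _ _ (by rfl)
      | false =>
        have hA : pvStageLoopA mk0 ["transformer_1_", "transformer_2_"] = (none, mk0) := by
          simp only [pvStageLoopA]; rw [if_neg (by rw [ht1]; decide), if_neg (by rw [ht2]; decide)]
        rw [hA, if_neg (show ¬((false : Bool) = true) by decide),
            if_neg (show ¬((false : Bool) = true) by decide),
            if_pos (show ((("" : String) == "") = true) by decide)]
        exact core_eq key _ _ _ _ (by rfl)

-- ===== VERDICT (by name: the statement is the Claim_ definition above) =====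
theorem convert_kohya_wan_key_to_original_py_spec : Claim_equal_convert_kohya_wan_key_to_original_py := by
  intro key _
  unfold Spec_convert_kohya_wan_key_to_original_py
  exact main_eq key
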